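-- pv_equiv track=rewrite | github.com/Oh-SeulGi0615/Algorithm-Study | 프로그래머스/unrated/181932. 코드 처리하기/코드 처리하기.py | solution
-- ===== SOURCE A (Python) =====
-- def solution(code):
--     ret = []
--     mode = 0
--     for i in range(len(code)):
--         if code[i] == '1':
--             if mode == 0:
--                 mode = 1
--             else:
--                 mode = 0
--
--         if mode == 0:
--             if i % 2 == 0:
--                 if code[i] != '1':
--                     ret.append(code[i])
--         else:
--             if i % 2 == 1:
--                 if code[i] != '1':
--                     ret.append(code[i])
--
--     if len(ret) > 0:
--         answer = ''.join(ret)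
--         return answer
--     else:
--         return 'EMPTY'
-- ===== SOURCE B (Python) =====
-- def solution(code):
--     # A non-'1' char at index i survives iff i % 2 equals the parity of '1'-count
--     # up to i; since i+1 = (#ones)+(#non-ones) in code[:i+1], that holds exactly
--     # when the cumulative number of non-'1' chars is odd.  So: delete all '1's,
--     # then keep every second remaining character starting with the first.
--     stripped = [c for c in code if c != '1']
--     kept = [c for i, c in enumerate(stripped) if i % 2 == 0]
--     return ''.join(kept) if kept else 'EMPTY'
-- ===== Notes on version B (the rewrite author's own statement) =====
-- stated objective: simpler
-- what changed: Replaces A's fused stateful scan (a mode bit toggled on '1' and compared against the index parity) by a closed characterization: the kept characters are exactly the even-indexed characters of the string with all '1's deleted, so B strips '1's and takes every second remaining char with no mode state at all.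
import Mathlib
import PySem

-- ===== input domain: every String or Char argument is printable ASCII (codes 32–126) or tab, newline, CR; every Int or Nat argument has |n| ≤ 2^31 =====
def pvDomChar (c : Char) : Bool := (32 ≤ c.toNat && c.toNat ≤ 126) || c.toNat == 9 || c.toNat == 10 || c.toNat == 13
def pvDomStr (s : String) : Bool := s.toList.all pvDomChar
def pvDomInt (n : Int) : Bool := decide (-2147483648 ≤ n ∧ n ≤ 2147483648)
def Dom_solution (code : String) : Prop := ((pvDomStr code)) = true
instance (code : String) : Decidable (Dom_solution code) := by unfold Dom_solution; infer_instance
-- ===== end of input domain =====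

-- B replaces A's stateful mode-toggling scan by a closed characterization: keep the even-indexed
-- characters of the string with all '1's deleted (no mode state); same cost, simpler.

-- ===== PORT A =====
def solution (code : String) : String :=
  let cs := code.toList
  let p := (PySem.List.pyRange 0 (PySem.List.len cs) 1).foldl
    (fun (st : List Char × Int) i =>
      let c := PySem.List.pyGetD cs i ' '
      let mode : Int := if c = '1' then (if st.2 = 0 then 1 else 0) else st.2
      let ret := if mode = 0 then
                   (if PySem.Int.mod i 2 = 0 then (if c ≠ '1' then st.1 ++ [c] else st.1) else st.1)
                 else
                   (if PySem.Int.mod i 2 = 1 then (if c ≠ '1' then st.1 ++ [c] else st.1) else st.1)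
      (ret, mode))
    ([], 0)
  if p.1.length > 0 then String.ofList p.1 else "EMPTY"

-- ===== PORT B =====
def solution_alt (code : String) : String :=
  let stripped := code.toList.filter (fun c => c != '1')
  let kept := ((PySem.List.enumerate stripped 0).filter
      (fun p => PySem.Int.mod p.1 2 == 0)).map (fun p => p.2)
  if kept ≠ [] then String.ofList kept else "EMPTY"

-- ===== PRECONDITION & SPEC =====
def Spec_solution (code : String) (out : String) : Prop := out = solution_alt code
instance (code : String) (out : String) : Decidable (Spec_solution code out) := by unfold Spec_solution; infer_instance

-- ===== CLAIM =====
def Claim_equal_solution : Prop := ∀ (code : String), Dom_solution code → Spec_solution code (solution code)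

-- ===== LEMMAS AND PROOFS =====

def pvToggle (m : Int) : Int := if m = 0 then 1 else 0

-- the kept characters of the suffix xs, starting at index s with current mode m (A's semantics)
def pvKeep : List Char → Int → Int → List Char
  | [], _, _ => []
  | c :: t, s, m =>
    let m' := if c = '1' then pvToggle m else m
    (if c ≠ '1' ∧ s % 2 = m' then [c] else []) ++ pvKeep t (s + 1) m'

-- alternating selector: keep the head iff the flag is true
def pvEvery : List Char → Bool → List Char
  | [], _ => []
  | c :: t, b => (if b then [c] else []) ++ pvEvery t (!b)

def pvStepA (st : List Char × Int) (p : Int × Char) : List Char × Int :=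
  let mode : Int := if p.2 = '1' then (if st.2 = 0 then 1 else 0) else st.2
  let ret := if mode = 0 then
               (if PySem.Int.mod p.1 2 = 0 then (if p.2 ≠ '1' then st.1 ++ [p.2] else st.1) else st.1)
             else
               (if PySem.Int.mod p.1 2 = 1 then (if p.2 ≠ '1' then st.1 ++ [p.2] else st.1) else st.1)
  (ret, mode)
lemma pvA_fold (xs : List Char) : ∀ (s : Int) (acc : List Char) (m : Int), (m = 0 ∨ m = 1) →
    ((PySem.List.enumerate xs s).foldl pvStepA (acc, m)).1 = acc ++ pvKeep xs s m := by
  induction xs with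
  | nil => intro s acc m _; simp [PySem.List.enumerate_nil, pvKeep]
  | cons c t ih =>
    intro s acc m hm
    rw [PySem.List.enumerate_cons]
    have hstep : pvStepA (acc, m) (s, c)
        = (acc ++ (if c ≠ '1' ∧ s % 2 = (if c = '1' then pvToggle m else m) then [c] else []),
           (if c = '1' then pvToggle m else m)) := by
      rcases hm with hm | hm <;> subst hm <;>
        by_cases hc : c = '1' <;>
        simp [pvStepA, pvToggle, hc] <;>
        split_ifs <;> simp_all
    have hm' : (if c = '1' then pvToggle m else m) = 0 ∨ (if c = '1' then pvToggle m else m) = 1 := by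
      rcases hm with hm | hm <;> subst hm <;> by_cases hc : c = '1' <;> simp [pvToggle, hc]
    simp only [List.foldl_cons, hstep, pvKeep]
    rw [ih (s + 1) _ _ hm', List.append_assoc]

-- A's kept list is the alternating selection of the '1'-stripped list:
-- the flag at a position is true iff (mode + index) is even there.
lemma pvKeep_eq_every (xs : List Char) : ∀ (s m : Int), (m = 0 ∨ m = 1) →
    pvKeep xs s m = pvEvery (xs.filter (fun c => c != '1')) (decide ((m + s) % 2 = 0)) := by
  induction xs with
  | nil => intro s m _; simp [pvKeep, pvEvery]
  | cons c t ih =>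
    intro s m hm
    by_cases hc : c = '1'
    · -- '1' is dropped and toggles the mode; the flag is unchanged since both m and s shift parity
      have htog : pvToggle m = 0 ∨ pvToggle m = 1 := by
        rcases hm with hm | hm <;> subst hm <;> simp [pvToggle]
      have hpar : (pvToggle m + (s + 1)) % 2 = (m + s) % 2 := by
        rcases hm with hm | hm <;> subst hm <;> simp [pvToggle] <;> omega
      simp only [pvKeep, if_pos hc]
      rw [if_neg (fun h => h.1 hc), ih (s + 1) (pvToggle m) htog, hpar]
      simp [hc]
    · -- a non-'1' char: kept iff s % 2 = m, i.e. iff (m + s) is even; flag flips for the tail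
      have hkeep : (c ≠ '1' ∧ s % 2 = m) ↔ ((m + s) % 2 = 0) := by
        rcases hm with hm | hm <;> subst hm <;> simp [hc] <;> omega
      have hflip : (decide ((m + (s + 1)) % 2 = 0)) = ! (decide ((m + s) % 2 = 0)) := by
        rcases Decidable.em ((m + s) % 2 = 0) with h | h <;> simp [h] <;> omega
      simp only [pvKeep, if_neg hc]
      rw [ih (s + 1) m hm, hflip]
      rcases Decidable.em ((m + s) % 2 = 0) with h | h
      · rw [if_pos (hkeep.mpr h)]
        simp [pvEvery, hc, h]
      · rw [if_neg (fun hx => h (hkeep.mp hx))]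
        simp [pvEvery, hc, h]

-- B's enumerate/filter/map is the same alternating selection
lemma pvB_every (xs : List Char) : ∀ (s : Int),
    (((PySem.List.enumerate xs s).filter (fun p => PySem.Int.mod p.1 2 == 0)).map (fun p => p.2))
      = pvEvery xs (decide (s % 2 = 0)) := by
  induction xs with
  | nil => intro s; simp [PySem.List.enumerate_nil, pvEvery]
  | cons c t ih =>
    intro s
    have hflip : (decide ((s + 1) % 2 = 0)) = ! (decide (s % 2 = 0)) := by
      rcases Decidable.em (s % 2 = 0) with h | h <;> simp [h] <;> omega
    rw [PySem.List.enumerate_cons, List.filter_cons]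
    have hih := ih (s + 1)
    rw [hflip] at hih
    rcases Decidable.em (s % 2 = 0) with h | h
    · have hb : (PySem.Int.mod s 2 == 0) = true := by simp [h]
      simp only [hb, if_true, List.map_cons, hih, h, decide_true, Bool.not_true, pvEvery]
      simp
    · have hb : (PySem.Int.mod s 2 == 0) = false := by simp [h]
      simp only [hb, Bool.false_eq_true, if_false, hih, h, decide_false, Bool.not_false, pvEvery]
      simp

lemma pv_main (code : String) : solution code = solution_alt code := by
  unfold solution solution_alt
  have hA : ((PySem.List.pyRange 0 (PySem.List.len code.toList) 1).foldl
      (fun (st : List Char × Int) i =>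
        let c := PySem.List.pyGetD code.toList i ' '
        let mode : Int := if c = '1' then (if st.2 = 0 then 1 else 0) else st.2
        let ret := if mode = 0 then
                     (if PySem.Int.mod i 2 = 0 then (if c ≠ '1' then st.1 ++ [c] else st.1) else st.1)
                   else
                     (if PySem.Int.mod i 2 = 1 then (if c ≠ '1' then st.1 ++ [c] else st.1) else st.1)
        (ret, mode)) ([], 0)).1 = pvKeep code.toList 0 0 := by
    have he := PySem.List.enumerate_eq_map_pyRange code.toList ' '
    have heq : (PySem.List.enumerate code.toList 0).foldl pvStepA (([] : List Char), (0 : Int))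
        = (PySem.List.pyRange 0 (PySem.List.len code.toList) 1).foldl
            (fun st i => pvStepA st (i, PySem.List.pyGetD code.toList i ' ')) ([], 0) := by
      rw [he, List.foldl_map]
    have h := pvA_fold code.toList 0 [] 0 (Or.inl rfl)
    rw [heq] at h
    simpa [pvStepA] using h
  simp only [hA]
  rw [pvB_every (code.toList.filter (fun c => c != '1')) 0]
  have hk := pvKeep_eq_every code.toList 0 0 (Or.inl rfl)
  simp only [show ((0 : Int) + 0) % 2 = 0 by norm_num, decide_true] at hk
  simp only [show (decide ((0 : Int) % 2 = 0)) = true by decide, hk]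
  rcases h : pvEvery (code.toList.filter (fun c => c != '1')) true with _ | ⟨c, t⟩ <;> simp

-- ===== VERDICT =====
theorem solution_spec : Claim_equal_solution := by
  intro code _
  unfold Spec_solution
  exact pv_main code
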